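-- pv_equiv track=rewrite | github.com/dv2811/Twitter_Crawler | tw_utils.py | text_count
-- ===== SOURCE A (Python) =====
-- string_exclude = {
-- 3: ["the","for","are","you","and","amp","our","how",'but','has','who','can','not'],
-- 4: ["from","that","with","this","will","some","more","what","your","they",'just','have','does','also','here'],
-- 5: ["which",'where','these','while','maybe','there','their'],
-- 7: ["because"],
-- }
--
-- def text_count(string):
-- 	delims = (' ',',',"'",'\n','?','&','!','"','(',')','<','=',';','+','|',"*")
-- 	indx = 0
-- 	outdata=[]
-- 	limit = len(string)
-- 	while indx<limit-1:
-- 		if string[indx] not in delims: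
-- 			for j in range(indx+1,limit,1):
-- 				if string[j] in delims:
-- 					tmp = string[indx:j]
-- 					break
-- 				if j == limit-1:
-- 					j+=1
-- 					tmp = string[indx:]
-- 					break
-- 					#self.array.append(string[indx:j].lower())
-- 					# Word shorter than 3 letter won't be counted as meaningful
--
-- 			if j-indx > 2:
-- 				if 'http' in tmp or tmp[0] in ('#','$','@'):
-- 					pass
-- 				# Links won't be counted as useful words
-- 				elif (j-indx) in string_exclude and tmp.lower() in string_exclude[(j-indx)]:
-- 					pass
-- 				# Cashtags and Hashtags are counted separately
-- 				elif '.' in tmp: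
-- 					outdata+=[char.lower() for char in tmp.split('.') if len(char)>2]
-- 				elif ':' in tmp:
-- 					outdata+=[char.lower() for char in tmp.split(':') if len(char)>2]
-- 				elif '/' in tmp:
-- 					outdata+=[char.lower() for char in tmp.split('/') if len(char)>2]
-- 				else:
-- 					outdata.append(tmp.lower())
-- 				#self.useful_words_count+=1
-- 			indx = j+1
-- 		else:
-- 			indx+=1
-- 	return outdata
-- ===== SOURCE B (Python) =====
-- # B: translate delimiters to a sentinel and split once, then filter each token
-- # through one early-return helper with a flat stopword set. (A scans with
-- # manual index arithmetic and nested loops.)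
--
-- _DELIMS = " ,'\n?&!\"()<=;+|*"
-- _TRANS = str.maketrans({c: "\x00" for c in _DELIMS})
--
-- # flat union of string_exclude: every word's length equals its dict key,
-- # so the length check is implied by membership
-- _STOPWORDS = {
--     "the","for","are","you","and","amp","our","how","but","has","who","can","not",
--     "from","that","with","this","will","some","more","what","your","they","just",
--     "have","does","also","here",
--     "which","where","these","while","maybe","there","their",
--     "because",
-- }
--
-- def _emit(tok):
--     if len(tok) <= 2:
--         return []
--     if 'http' in tok or tok[0] in '#$@':
--         return []
--     if tok.lower() in _STOPWORDS:
--         return []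
--     for sep in '.:/':
--         if sep in tok:
--             return [part.lower() for part in tok.split(sep) if len(part) > 2]
--     return [tok.lower()]
--
-- def text_count(string):
--     return [w for tok in string.translate(_TRANS).split('\x00') for w in _emit(tok)]
-- ===== Notes on version B (the rewrite author's own statement) =====
-- stated objective: faster
-- what changed: A scans with a while-loop over indices plus a nested for-loop and manual slicing to cut out each token; B translates all delimiter characters to a sentinel in one pass, splits once, and filters each token through a single early-return helper that uses one flat stopword set instead of the length-keyed dict.
import Mathlib
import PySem

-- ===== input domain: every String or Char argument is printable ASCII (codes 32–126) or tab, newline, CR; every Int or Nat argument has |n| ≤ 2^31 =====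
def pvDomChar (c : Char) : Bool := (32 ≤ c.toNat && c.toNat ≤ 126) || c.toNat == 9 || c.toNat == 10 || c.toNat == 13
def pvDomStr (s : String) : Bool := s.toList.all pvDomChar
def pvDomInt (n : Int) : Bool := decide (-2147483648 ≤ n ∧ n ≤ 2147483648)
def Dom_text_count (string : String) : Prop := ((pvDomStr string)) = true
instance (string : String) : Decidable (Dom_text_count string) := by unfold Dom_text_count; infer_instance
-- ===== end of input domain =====

-- B replaces A's index-jumping scan (while + inner for + slicing) by one translate-to-sentinel
-- pass, a single split, and a per-token early-return filter with a flat stopword set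
-- (measured constant-factor speedup in Python).

-- ===== PORT A =====
def tcDelims : List Char :=
  [' ', ',', '\'', '\n', '?', '&', '!', '"', '(', ')', '<', '=', ';', '+', '|', '*']

def tcExclude : List (Nat × List (List Char)) :=
  [(3, ["the","for","are","you","and","amp","our","how","but","has","who","can","not"].map String.toList),
   (4, ["from","that","with","this","will","some","more","what","your","they","just","have","does","also","here"].map String.toList),
   (5, ["which","where","these","while","maybe","there","their"].map String.toList),
   (7, ["because"].map String.toList)]

-- A's inner for-loop: scan from j for the first delimiter; returns Python's (j, tmp) at the
-- break. The fuel argument only makes the recursion structural; every call made by tcLoop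
-- carries fuel = limit - j, which the scan never exhausts.
def tcFindJ (chars : List Char) (limit indx : Nat) : Nat → Nat → Nat × List Char
  | j, 0 => (j, [])
  | j, fuel + 1 =>
    if j < limit then
      if tcDelims.contains (chars.getD j ' ') then
        (j, PySem.List.slice chars (some (indx : Int)) (some (j : Int)))
      else if j = limit - 1 then
        (j + 1, PySem.List.slice chars (some (indx : Int)) none)
      else tcFindJ chars limit indx (j + 1) fuel
    else (j, [])

-- A's per-token body (n is Python's j - indx)
def tcProcess (n : Nat) (tmp : List Char) : List (List Char) :=
  if n > 2 then
    if PySem.Chars.isIn "http".toList tmp || decide (tmp.headD ' ' ∈ ['#', '$', '@']) then []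
    else if (match tcExclude.lookup n with
             | some ws => decide (PySem.Chars.lower tmp ∈ ws)
             | none => false) then []
    else if PySem.Chars.isIn ['.'] tmp then
      ((PySem.Chars.splitOn tmp ['.']).filter (fun w => w.length > 2)).map PySem.Chars.lower
    else if PySem.Chars.isIn [':'] tmp then
      ((PySem.Chars.splitOn tmp [':']).filter (fun w => w.length > 2)).map PySem.Chars.lower
    else if PySem.Chars.isIn ['/'] tmp then
      ((PySem.Chars.splitOn tmp ['/']).filter (fun w => w.length > 2)).map PySem.Chars.lower
    else [PySem.Chars.lower tmp]
  else []

-- A's outer while-loop (fuel = limit keeps the recursion structural; indx grows by at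
-- least 1 per iteration, so the loop never exhausts it)
def tcLoop (chars : List Char) (limit : Nat) : Nat → List (List Char) → Nat → List (List Char)
  | _, outdata, 0 => outdata
  | indx, outdata, fuel + 1 =>
    if indx < limit - 1 then
      if tcDelims.contains (chars.getD indx ' ') = false then
        let jt := tcFindJ chars limit indx (indx + 1) (limit - (indx + 1))
        tcLoop chars limit (jt.1 + 1) (outdata ++ tcProcess (jt.1 - indx) jt.2) fuel
      else tcLoop chars limit (indx + 1) outdata fuel
    else outdata

def text_count (string : String) : List String :=
  (tcLoop string.toList string.toList.length 0 [] string.toList.length).map String.mk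

-- ===== PORT B =====
def tcDelimsB : List Char := " ,'\n?&!\"()<=;+|*".toList

-- the flat union of A's string_exclude (Python set literal; membership list)
def tcStop : List (List Char) :=
  ["the","for","are","you","and","amp","our","how","but","has","who","can","not",
   "from","that","with","this","will","some","more","what","your","they","just",
   "have","does","also","here",
   "which","where","these","while","maybe","there","their",
   "because"].map String.toList

def tcSeps : List (List Char) := [['.'], [':'], ['/']]

def tcEmit (tok : List Char) : List (List Char) :=
  if tok.length ≤ 2 then []
  else if PySem.Chars.isIn "http".toList tok || decide (tok.headD ' ' ∈ ['#', '$', '@']) then []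
  else if decide (PySem.Chars.lower tok ∈ tcStop) then []
  else
    match tcSeps.find? (fun sep => PySem.Chars.isIn sep tok) with
    | some sep => ((PySem.Chars.splitOn tok sep).filter (fun w => w.length > 2)).map PySem.Chars.lower
    | none => [PySem.Chars.lower tok]

def text_count_alt (string : String) : List String :=
  (((string.toList.map (fun c => if tcDelimsB.contains c then '\x00' else c)).splitOn
      '\x00').flatMap tcEmit).map String.mk

-- ===== PRECONDITION & SPEC =====
def Spec_text_count (string : String) (out : List String) : Prop := out = text_count_alt string
instance (string : String) (out : List String) : Decidable (Spec_text_count string out) := by unfold Spec_text_count; infer_instance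

-- ===== CLAIM (what is proved, stated in full; the proofs are below) =====
def Claim_equal_text_count : Prop := ∀ (string : String), Dom_text_count string → Spec_text_count string (text_count string)

-- ===== LEMMAS AND PROOFS =====

theorem tc_delims_eq : tcDelimsB = tcDelims := by decide

theorem tc_sentinel_split (l : List Char) (h : ∀ c ∈ l, pvDomChar c = true) :
    (l.map (fun c => if tcDelimsB.contains c then '\x00' else c)).splitOn '\x00'
      = l.splitOnP (fun c => tcDelims.contains c) := by
  show (l.map (fun c => if tcDelimsB.contains c then '\x00' else c)).splitOnP (· == '\x00')
      = l.splitOnP (fun c => tcDelims.contains c)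
  induction l with
  | nil => rfl
  | cons c t ih =>
    have hc : pvDomChar c = true := h c (by simp)
    have ht : ∀ c ∈ t, pvDomChar c = true := fun c hc => h c (by simp [hc])
    rw [List.map_cons]
    by_cases hdl : tcDelimsB.contains c = true
    · have hdr : tcDelims.contains c = true := tc_delims_eq ▸ hdl
      rw [if_pos hdl, List.splitOnP_cons, List.splitOnP_cons,
          if_pos (show (('\x00' : Char) == '\x00') = true from rfl),
          if_pos hdr, ih ht]
    · have hdr : tcDelims.contains c = false := tc_delims_eq ▸ Bool.eq_false_iff.mpr hdl
      have hne : (c == '\x00') = false := by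
        apply beq_eq_false_iff_ne.mpr
        intro e
        subst e
        simp [pvDomChar] at hc
      rw [if_neg hdl, List.splitOnP_cons, List.splitOnP_cons,
          if_neg (fun hq => absurd (hne.symm.trans hq) (by decide)),
          if_neg (fun hq => absurd (hdr.symm.trans hq) (by decide)), ih ht]

theorem tc_stop_iff (w : List Char) :
    (match tcExclude.lookup w.length with
     | some ws => decide (w ∈ ws)
     | none => false) = decide (w ∈ tcStop) := by
  by_cases hw : w ∈ tcStop
  · rw [decide_eq_true hw]
    simp only [tcStop, List.map_cons, List.map_nil, List.mem_cons, List.not_mem_nil,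
      or_false] at hw
    rcases hw with rfl|rfl|rfl|rfl|rfl|rfl|rfl|rfl|rfl|rfl|rfl|rfl|rfl|rfl|rfl|rfl|rfl|rfl|rfl|rfl|rfl|rfl|rfl|rfl|rfl|rfl|rfl|rfl|rfl|rfl|rfl|rfl|rfl|rfl|rfl|rfl|rfl <;> decide
  · rw [decide_eq_false hw]
    by_cases h3 : w.length = 3
    · rw [show (match tcExclude.lookup w.length with
          | some ws => decide (w ∈ ws)
          | none => false) = decide (w ∈ ["the","for","are","you","and","amp","our","how","but","has","who","can","not"].map String.toList) by
        rw [h3]; rfl]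
      apply decide_eq_false
      intro hm
      apply hw
      fin_cases hm <;> decide
    · by_cases h4 : w.length = 4
      · rw [show (match tcExclude.lookup w.length with
            | some ws => decide (w ∈ ws)
            | none => false) = decide (w ∈ ["from","that","with","this","will","some","more","what","your","they","just","have","does","also","here"].map String.toList) by
          rw [h4]; rfl]
        apply decide_eq_false
        intro hm
        apply hw
        fin_cases hm <;> decide
      · by_cases h5 : w.length = 5
        · rw [show (match tcExclude.lookup w.length with
              | some ws => decide (w ∈ ws)
              | none => false) = decide (w ∈ ["which","where","these","while","maybe","there","their"].map String.toList) by
            rw [h5]; rfl]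
          apply decide_eq_false
          intro hm
          apply hw
          fin_cases hm <;> decide
        · by_cases h7 : w.length = 7
          · rw [show (match tcExclude.lookup w.length with
                | some ws => decide (w ∈ ws)
                | none => false) = decide (w ∈ ["because"].map String.toList) by
              rw [h7]; rfl]
            apply decide_eq_false
            intro hm
            apply hw
            fin_cases hm <;> decide
          · have e3 : (w.length == 3) = false := beq_eq_false_iff_ne.mpr h3
            have e4 : (w.length == 4) = false := beq_eq_false_iff_ne.mpr h4
            have e5 : (w.length == 5) = false := beq_eq_false_iff_ne.mpr h5
            have e7 : (w.length == 7) = false := beq_eq_false_iff_ne.mpr h7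
            have hlk : tcExclude.lookup w.length = none := by
              simp only [tcExclude, List.lookup, e3, e4, e5, e7]
            rw [hlk]

theorem tc_emit_short (t : List Char) (h : t.length ≤ 2) : tcEmit t = [] := by
  simp [tcEmit, h]

theorem tc_emit_eq (n : Nat) (tmp : List Char) (hn : n = tmp.length) :
    tcProcess n tmp = tcEmit tmp := by
  subst hn
  by_cases h2 : tmp.length ≤ 2
  · rw [tc_emit_short tmp h2]
    simp [tcProcess, show ¬ tmp.length > 2 by omega]
  · have hlow : (PySem.Chars.lower tmp).length = tmp.length := by
      simp [PySem.Chars.lower]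
    rw [tcProcess, tcEmit, if_pos (by omega : tmp.length > 2), if_neg h2]
    by_cases hh : (PySem.Chars.isIn "http".toList tmp
        || decide (tmp.headD ' ' ∈ ['#', '$', '@'])) = true
    · rw [if_pos hh, if_pos hh]
    · rw [if_neg hh, if_neg hh]
      rw [show (match tcExclude.lookup tmp.length with
          | some ws => decide (PySem.Chars.lower tmp ∈ ws)
          | none => false) = decide (PySem.Chars.lower tmp ∈ tcStop) by
        rw [← hlow, tc_stop_iff]]
      by_cases hs : decide (PySem.Chars.lower tmp ∈ tcStop) = true
      · rw [if_pos hs, if_pos hs]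
      · rw [if_neg hs, if_neg hs]
        by_cases hdot : PySem.Chars.isIn ['.'] tmp = true
        · rw [if_pos hdot]
          simp [tcSeps, hdot]
        · rw [if_neg hdot]
          by_cases hcol : PySem.Chars.isIn [':'] tmp = true
          · rw [if_pos hcol]
            simp [tcSeps, List.find?, hdot, hcol]
          · rw [if_neg hcol]
            by_cases hsl : PySem.Chars.isIn ['/'] tmp = true
            · rw [if_pos hsl]
              simp [tcSeps, List.find?, hdot, hcol, hsl]
            · rw [if_neg hsl]
              simp [tcSeps, List.find?, hdot, hcol, hsl]

theorem tc_findJ_eq (chars : List Char) (indx : Nat) :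
    ∀ fuel j, j < chars.length → chars.length - j ≤ fuel →
    tcFindJ chars chars.length indx j fuel =
      (j + ((chars.drop j).takeWhile (fun c => !tcDelims.contains c)).length,
       (chars.drop indx).take
         (j + ((chars.drop j).takeWhile (fun c => !tcDelims.contains c)).length - indx)) := by
  intro fuel
  induction fuel with
  | zero => intro j hj hf; omega
  | succ fuel ih =>
    intro j hj hf
    have hdrop : chars.drop j = chars[j] :: chars.drop (j + 1) :=
      List.drop_eq_getElem_cons hj
    have hgetD : chars.getD j ' ' = chars[j] := List.getD_eq_getElem chars ' ' hj
    rw [tcFindJ, if_pos hj, hgetD]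
    by_cases hd : tcDelims.contains chars[j] = true
    · rw [if_pos hd, hdrop]
      simp only [List.takeWhile_cons, hd, Bool.not_true, Bool.false_eq_true, ite_false,
        List.length_nil, Nat.add_zero]
      rw [PySem.List.slice_natCast]
    · have hdf : tcDelims.contains chars[j] = false := Bool.eq_false_iff.mpr hd
      have hd' : (!tcDelims.contains chars[j]) = true := by rw [hdf]; rfl
      rw [if_neg hd, hdrop]
      by_cases hend : j = chars.length - 1
      · rw [if_pos hend]
        have hnil : chars.drop (j + 1) = [] := List.drop_eq_nil_of_le (by omega)
        simp only [hnil, List.takeWhile_cons, hd', ite_true, List.takeWhile_nil,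
          List.length_cons, List.length_nil, Nat.zero_add]
        rw [PySem.List.slice_from_natCast]
        have hlen : (chars.drop indx).length = chars.length - indx := List.length_drop
        rw [List.take_of_length_le (by omega)]
      · rw [if_neg hend]
        rw [ih (j + 1) (by omega) (by omega)]
        simp only [List.takeWhile_cons, hd', ite_true, List.length_cons]
        have e1 : j + 1 + ((chars.drop (j + 1)).takeWhile
            (fun c => !tcDelims.contains c)).length
            = j + (((chars.drop (j + 1)).takeWhile
                (fun c => !tcDelims.contains c)).length + 1) := by omega
        rw [e1]

theorem tc_splitOnP_head (p : Char → Bool) (t : List Char) :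
    t.splitOnP p = (t.takeWhile (fun c => !p c)) ::
      (match t.dropWhile (fun c => !p c) with
       | [] => []
       | _ :: r => r.splitOnP p) := by
  induction t with
  | nil => simp [List.splitOnP_nil]
  | cons c t ih =>
    rw [List.splitOnP_cons]
    by_cases hc : p c = true
    · simp [hc]
    · have hc' : (!p c) = true := by simp [Bool.eq_false_iff.mpr hc]
      rw [if_neg hc, ih]
      simp [hc]

theorem tc_loop_eq (chars : List Char) (k indx : Nat) (out : List (List Char))
    (hk : chars.length - indx ≤ k) :
    tcLoop chars chars.length indx out k
      = out ++ ((chars.drop indx).splitOnP (fun c => tcDelims.contains c)).flatMap tcEmit := by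
  induction k generalizing indx out with
  | zero =>
    rw [tcLoop]
    have hnil : chars.drop indx = [] := List.drop_eq_nil_of_le (by omega)
    rw [hnil, List.splitOnP_nil]
    simp [tc_emit_short [] (by simp)]
  | succ k ih =>
    by_cases hlt : indx < chars.length - 1
    · have hidx : indx < chars.length := by omega
      have hdropc : chars.drop indx = chars[indx] :: chars.drop (indx + 1) :=
        List.drop_eq_getElem_cons hidx
      have hgetD : chars.getD indx ' ' = chars[indx] := List.getD_eq_getElem chars ' ' hidx
      rw [tcLoop, if_pos hlt, hgetD]
      by_cases hd : tcDelims.contains chars[indx] = true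
      · rw [if_neg (fun hf => absurd (hd.symm.trans hf) (by decide))]
        rw [ih (indx + 1) out (by omega)]
        rw [hdropc, List.splitOnP_cons, if_pos hd]
        simp [tc_emit_short [] (by simp)]
      · have hdf : tcDelims.contains chars[indx] = false := Bool.eq_false_iff.mpr hd
        rw [if_pos hdf]
        rw [tc_findJ_eq chars indx (chars.length - (indx + 1)) (indx + 1) (by omega) (by omega)]
        set tw := (chars.drop (indx + 1)).takeWhile (fun c => !tcDelims.contains c) with htw
        set dw := (chars.drop (indx + 1)).dropWhile (fun c => !tcDelims.contains c) with hdwdef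
        have hsplit : tw ++ dw = chars.drop (indx + 1) :=
          List.takeWhile_append_dropWhile
        simp only
        have harg : indx + 1 + tw.length - indx = tw.length + 1 := by omega
        rw [harg]
        have htmp : (chars.drop indx).take (tw.length + 1) = chars[indx] :: tw := by
          rw [hdropc, List.take_succ_cons]
          congr 1
          rw [← hsplit, List.take_left]
        rw [htmp]
        rw [tc_emit_eq (tw.length + 1) (chars[indx] :: tw) (by simp)]
        rw [ih (indx + 1 + tw.length + 1) _ (by omega)]
        rw [hdropc, List.splitOnP_cons, if_neg hd,
            tc_splitOnP_head (fun c => tcDelims.contains c) (chars.drop (indx + 1)),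
            ← htw, ← hdwdef]
        have hdw : chars.drop (indx + 1 + tw.length + 1) = dw.drop 1 := by
          have h1 : chars.drop (indx + 1 + tw.length + 1)
              = ((chars.drop (indx + 1)).drop tw.length).drop 1 := by
            rw [List.drop_drop, List.drop_drop]
            congr 1
            try omega
          rw [h1, ← hsplit, List.drop_left]
        cases hdwe : dw with
        | nil =>
          rw [hdw, hdwe]
          simp [List.splitOnP_nil, tc_emit_short [] (by simp)]
        | cons d r =>
          rw [hdw, hdwe]
          simp
    · rw [tcLoop, if_neg hlt]
      cases e : chars.drop indx with
      | nil =>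
        rw [List.splitOnP_nil]
        simp [tc_emit_short [] (by simp)]
      | cons c t =>
        have hlen1 : (chars.drop indx).length ≤ 1 := by
          rw [List.length_drop]
          omega
        have ht : t = [] := by
          rw [e] at hlen1
          simp only [List.length_cons] at hlen1
          exact List.eq_nil_of_length_eq_zero (by omega)
        subst ht
        rw [List.splitOnP_cons, List.splitOnP_nil]
        by_cases hc : tcDelims.contains c = true
        · rw [if_pos hc]
          simp only [List.flatMap_cons, List.flatMap_nil, tc_emit_short [] (by simp)]
          simp
        · rw [if_neg hc]
          simp only [List.modifyHead, List.flatMap_cons, List.flatMap_nil,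
            tc_emit_short [c] (by simp)]
          simp

-- ===== VERDICT (by name: the statement is the Claim_ definition above) =====
theorem text_count_spec : Claim_equal_text_count := by
  intro s hdom
  unfold Spec_text_count text_count text_count_alt
  rw [tc_loop_eq s.toList s.toList.length 0 [] (by omega),
      tc_sentinel_split s.toList (by
        intro c hc
        have := hdom
        unfold Dom_text_count pvDomStr at this
        exact List.all_eq_true.mp this c hc)]
  simp
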